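-- pv_equiv track=rewrite | github.com/wbfw109/study-core | src/python/wbfw109/algorithms/_practice/programmers/lv0.py | solution_181893
-- ===== SOURCE A (Python) =====
-- def solution_181893(arr: list[int], query: list[int]) -> list[int]:
--     """배열 조각하기 ; https://school.programmers.co.kr/learn/courses/30/lessons/181893"""
--     is_even: int = 0
--     for qi in query:
--         if is_even := is_even ^ 1:
--             arr = arr[: qi + 1]
--         else:
--             arr = arr[qi:]
--     return arr
-- ===== SOURCE B (Python) =====
-- def solution_181893(arr: list[int], query: list[int]) -> list[int]:
--     """배열 조각하기 — track the window [lo, hi) over the original arr,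
--     update it in O(1) per query, and slice once at the end."""
--     lo, hi = 0, len(arr)
--     truncate_right = True
--     for qi in query:
--         m = hi - lo
--         if truncate_right:
--             s = qi + 1
--             hi = lo + (max(0, m + s) if s < 0 else min(s, m))
--         else:
--             lo = lo + (max(0, m + qi) if qi < 0 else min(qi, m))
--         truncate_right = not truncate_right
--     return arr[lo:hi]
-- ===== Notes on version B (the rewrite author's own statement) =====
-- stated objective: alternative
-- what changed: Instead of materialising a new list slice per query, B tracks the window [lo, hi) over the original list with O(1) arithmetic updates per query (implementing Python's slice clamping and negative-index rules arithmetically) and slices once at the end.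
import Mathlib
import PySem

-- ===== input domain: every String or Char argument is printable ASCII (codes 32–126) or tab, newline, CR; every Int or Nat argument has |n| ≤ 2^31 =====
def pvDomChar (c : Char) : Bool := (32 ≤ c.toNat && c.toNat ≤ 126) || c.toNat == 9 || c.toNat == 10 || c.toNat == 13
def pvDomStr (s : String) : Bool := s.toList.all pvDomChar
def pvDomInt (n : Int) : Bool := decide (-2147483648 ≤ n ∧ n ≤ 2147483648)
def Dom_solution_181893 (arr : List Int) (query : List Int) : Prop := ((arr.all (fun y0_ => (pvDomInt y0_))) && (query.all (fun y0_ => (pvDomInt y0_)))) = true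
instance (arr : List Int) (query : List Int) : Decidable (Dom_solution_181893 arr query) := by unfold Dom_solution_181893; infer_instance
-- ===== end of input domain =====

-- B replaces A's per-query list slicing by O(1) window-index updates over the original list,
-- with one slice at the end (objective: alternative algorithm, same observable result).

-- ===== PORT A =====
-- one loop iteration of A: is_even := is_even ^ 1; truthy → arr = arr[:qi+1], else arr = arr[qi:]
def pvStepA (st : List Int × Int) (qi : Int) : List Int × Int :=
  let isEven := PySem.Int.bxor st.2 1
  if isEven ≠ 0 then (PySem.List.slice st.1 none (some (qi + 1)), isEven)
  else (PySem.List.slice st.1 (some qi) none, isEven)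

def solution_181893 (arr : List Int) (query : List Int) : List Int :=
  (query.foldl pvStepA (arr, 0)).1

-- ===== PORT B =====
-- one loop iteration of B: update the window [lo, hi) in O(1), Python-slice clamping done arithmetically
def pvStepB (st : Int × Int × Bool) (qi : Int) : Int × Int × Bool :=
  let lo := st.1
  let hi := st.2.1
  let m := hi - lo
  if st.2.2 then
    let s := qi + 1
    (lo, lo + (if s < 0 then max 0 (m + s) else min s m), false)
  else
    (lo + (if qi < 0 then max 0 (m + qi) else min qi m), hi, true)

def solution_181893_alt (arr : List Int) (query : List Int) : List Int :=
  let st := query.foldl pvStepB (0, (arr.length : Int), true)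
  PySem.List.slice arr (some st.1) (some st.2.1)

-- ===== PRECONDITION & SPEC =====
def Spec_solution_181893 (arr : List Int) (query : List Int) (out : List Int) : Prop := out = solution_181893_alt arr query
instance (arr : List Int) (query : List Int) (out : List Int) : Decidable (Spec_solution_181893 arr query out) := by unfold Spec_solution_181893; infer_instance

-- ===== CLAIM (what is proved, stated in full; the proofs are below) =====
def Claim_equal_solution_181893 : Prop := ∀ (arr : List Int) (query : List Int), Dom_solution_181893 arr query → Spec_solution_181893 arr query (solution_181893 arr query)


-- ===== LEMMAS AND PROOFS =====

-- A's parity accumulator as a function of B's boolean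
def pvParity (b : Bool) : Int := if b then 0 else 1

lemma pvStepA_zero (cur : List Int) (qi : Int) :
    pvStepA (cur, 0) qi = (PySem.List.slice cur none (some (qi + 1)), 1) := by
  have h : PySem.Int.bxor 0 1 = 1 := by decide
  simp [pvStepA, h]

lemma pvStepA_one (cur : List Int) (qi : Int) :
    pvStepA (cur, 1) qi = (PySem.List.slice cur (some qi) none, 0) := by
  simp [pvStepA]

lemma pvStepB_true (lo hi qi : Int) :
    pvStepB (lo, hi, true) qi
      = (lo, lo + (if qi + 1 < 0 then max 0 ((hi - lo) + (qi + 1)) else min (qi + 1) (hi - lo)), false) := rfl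

lemma pvStepB_false (lo hi qi : Int) :
    pvStepB (lo, hi, false) qi
      = (lo + (if qi < 0 then max 0 ((hi - lo) + qi) else min qi (hi - lo)), hi, true) := rfl

-- one query step: A's sliced list stays a window of the original list, and the window
-- indices are exactly what B computes
lemma pv_step_eq (arr : List Int) (lo hi : Nat) (b : Bool) (qi : Int)
    (h1 : lo ≤ hi) (h2 : hi ≤ arr.length) :
    ∃ lo' hi' : Nat, lo' ≤ hi' ∧ hi' ≤ arr.length ∧
      pvStepA ((arr.drop lo).take (hi - lo), pvParity b) qi
        = ((arr.drop lo').take (hi' - lo'), pvParity (!b)) ∧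
      pvStepB ((lo : Int), (hi : Int), b) qi = ((lo' : Int), (hi' : Int), !b) := by
  have hlen : ((arr.drop lo).take (hi - lo)).length = hi - lo := by simp; omega
  cases b with
  | true =>
    have hp : pvParity true = 0 := rfl
    have hp' : pvParity (!true) = 1 := rfl
    by_cases hs : qi + 1 < 0
    · set k := (-(qi + 1)).toNat with hkdef
      have hkpos : 0 < k := by omega
      have hk : qi + 1 = -((k : Nat) : Int) := by omega
      refine ⟨lo, lo + ((hi - lo) - k), by omega, by omega, ?_, ?_⟩
      · rw [hp, hp', pvStepA_zero, hk, PySem.List.slice_to_neg_natCast _ _ hkpos, hlen]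
        simp only [Prod.mk.injEq, and_true]
        rw [List.take_take]
        congr 1
        omega
      · rw [pvStepB_true, if_pos hs]
        simp only [Prod.mk.injEq, Bool.not_true, true_and, and_true]
        omega
    · refine ⟨lo, lo + min (qi + 1).toNat (hi - lo), by omega, by omega, ?_, ?_⟩
      · rw [hp, hp', pvStepA_zero, PySem.List.slice_to _ (by omega)]
        simp only [Prod.mk.injEq, and_true]
        rw [List.take_take]
        congr 1
        omega
      · rw [pvStepB_true, if_neg hs]
        simp only [Prod.mk.injEq, Bool.not_true, true_and, and_true]
        omega
  | false =>
    have hp : pvParity false = 1 := rfl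
    have hp' : pvParity (!false) = 0 := rfl
    by_cases hs : qi < 0
    · set k := (-qi).toNat with hkdef
      have hkpos : 0 < k := by omega
      have hk : qi = -((k : Nat) : Int) := by omega
      refine ⟨lo + ((hi - lo) - k), hi, by omega, h2, ?_, ?_⟩
      · rw [hp, hp', pvStepA_one, hk, PySem.List.slice_from_neg_natCast _ _ hkpos, hlen,
          List.drop_take, List.drop_drop]
        simp only [Prod.mk.injEq, and_true]
        congr 1
        omega
      · rw [pvStepB_false, if_pos hs]
        simp only [Prod.mk.injEq, Bool.not_false, and_true]
        omega
    · refine ⟨lo + min qi.toNat (hi - lo), hi, by omega, h2, ?_, ?_⟩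
      · rw [hp, hp', pvStepA_one, PySem.List.slice_from _ (by omega), List.drop_take,
          List.drop_drop]
        simp only [Prod.mk.injEq, and_true]
        by_cases hq : qi.toNat ≤ hi - lo
        · have hm : min qi.toNat (hi - lo) = qi.toNat := by omega
          rw [hm]
          congr 1
          omega
        · have h0 : hi - lo - qi.toNat = 0 := by omega
          have h0' : hi - (lo + min qi.toNat (hi - lo)) = 0 := by omega
          rw [h0, h0', List.take_zero, List.take_zero]
      · rw [pvStepB_false, if_neg hs]
        simp only [Prod.mk.injEq, Bool.not_false, and_true]
        omega

lemma pv_inv (arr : List Int) (query : List Int) :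
    ∀ (lo hi : Nat) (b : Bool), lo ≤ hi → hi ≤ arr.length →
    (query.foldl pvStepA ((arr.drop lo).take (hi - lo), pvParity b)).1
      = (let st := query.foldl pvStepB ((lo : Int), (hi : Int), b)
         PySem.List.slice arr (some st.1) (some st.2.1)) := by
  induction query with
  | nil =>
      intro lo hi b h1 h2
      simp [PySem.List.slice_natCast]
  | cons qi rest ih =>
      intro lo hi b h1 h2
      obtain ⟨lo', hi', h1', h2', hA, hB⟩ := pv_step_eq arr lo hi b qi h1 h2
      simp only [List.foldl_cons, hA, hB]
      exact ih lo' hi' (!b) h1' h2'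

-- ===== VERDICT (by name: the statement is the Claim_ definition above) =====
theorem solution_181893_spec : Claim_equal_solution_181893 := by
  intro arr query _
  unfold Spec_solution_181893 solution_181893 solution_181893_alt
  have h := pv_inv arr query 0 arr.length true (Nat.zero_le _) (le_refl _)
  simpa [pvParity] using h
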